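-- pv_equiv track=rewrite | github.com/GeorgePen93/leads | main.py | merge_leads
-- ===== SOURCE A (Python) =====
-- def merge_leads(leads: list) -> list:
--     """
--     Function takes a list of leads and de-duplicates them by company name
--     Merges so that we get the least amount of null values per company
--     """
--
--     merged = {}
--
--     for item in leads:
--         company = item.get("company")
--
--         # if we have not seen it then add it to the new dictionary
--         if company not in merged:
--             merged[company] = item.copy()
--         # if we have already seen it, check whether this record has any values the original doesnt
--         else:
--             for field, value in item.items():
--                 if merged[company].get(field) is None and value is not None:
--                     merged[company][field] = value
--     return list(merged.values())
-- ===== SOURCE B (Python) =====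
-- def merge_leads(leads: list) -> list:
--     """Group leads by company first, then reduce each group to one merged record."""
--     groups = {}
--     for item in leads:
--         c = item.get("company")
--         groups[c] = groups.get(c, []) + [item]
--
--     result = []
--     for grp in groups.values():
--         rec = grp[0].copy()
--         for item in grp[1:]:
--             for field, value in item.items():
--                 if rec.get(field) is None and value is not None:
--                     rec[field] = value
--         result.append(rec)
--     return result
-- ===== Notes on version B (the rewrite author's own statement) =====
-- stated objective: alternative
-- what changed: A merges duplicates into the accumulator in one interleaved pass; B first groups leads into company -> list of leads (first-appearance order), then reduces each group to one record seeded with the group's first item.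
import Mathlib
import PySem

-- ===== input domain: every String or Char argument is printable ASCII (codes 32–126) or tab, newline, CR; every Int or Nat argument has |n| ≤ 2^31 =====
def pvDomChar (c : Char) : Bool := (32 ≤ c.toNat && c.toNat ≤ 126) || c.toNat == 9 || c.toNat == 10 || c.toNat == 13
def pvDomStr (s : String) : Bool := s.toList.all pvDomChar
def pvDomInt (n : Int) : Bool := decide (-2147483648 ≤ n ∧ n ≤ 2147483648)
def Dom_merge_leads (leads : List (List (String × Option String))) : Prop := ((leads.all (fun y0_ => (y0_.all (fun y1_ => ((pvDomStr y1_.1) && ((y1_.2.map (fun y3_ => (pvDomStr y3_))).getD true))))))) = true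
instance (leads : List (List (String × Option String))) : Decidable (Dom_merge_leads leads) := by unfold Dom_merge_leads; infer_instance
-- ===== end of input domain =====

-- B restructures A's single interleaved merge pass into group-by-company then reduce-per-group (alternative decomposition, same cost); neither program mutates its input.

-- shared inner field-merge step, appearing verbatim in both Pythons:
-- 'if rec.get(field) is None and value is not None: rec[field] = value'
def pvFill (m : PySem.Dict String (Option String)) (p : String × Option String) :
    PySem.Dict String (Option String) :=
  if m.getD p.1 none = none ∧ p.2 ≠ none then m.insert p.1 p.2 else m

-- item.get("company"): None both when the key is absent and when the stored value is None
def pvCompany (d : PySem.Dict String (Option String)) : Option String :=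
  (d.get? "company").getD none

-- ===== PORT A =====
-- A's single pass: first sighting stores a copy, later sightings fill None fields in place
def pvAStep (merged : PySem.Dict (Option String) (PySem.Dict String (Option String)))
    (item : List (String × Option String)) :
    PySem.Dict (Option String) (PySem.Dict String (Option String)) :=
  let d := PySem.Dict.ofList item
  let c := pvCompany d
  if merged.contains c = false then merged.insert c d
  else merged.insert c (d.items.foldl pvFill (merged.getD c PySem.Dict.empty))

def merge_leads (leads : List (List (String × Option String))) : List (List (String × Option String)) :=
  ((leads.foldl pvAStep PySem.Dict.empty).values).map PySem.Dict.items

-- ===== PORT B =====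
-- B pass 1: group leads by company in first-appearance order
def pvBGroup (g : PySem.Dict (Option String) (List (PySem.Dict String (Option String))))
    (item : List (String × Option String)) :
    PySem.Dict (Option String) (List (PySem.Dict String (Option String))) :=
  let d := PySem.Dict.ofList item
  let c := pvCompany d
  g.insert c (g.getD c [] ++ [d])

-- B pass 2: reduce a group to one record (groups are built non-empty; [] case is unreachable)
def pvReduce (grp : List (PySem.Dict String (Option String))) : PySem.Dict String (Option String) :=
  match grp with
  | [] => PySem.Dict.empty
  | h :: t => t.foldl (fun m d => d.items.foldl pvFill m) h

def merge_leads_alt (leads : List (List (String × Option String))) : List (List (String × Option String)) :=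
  let groups := leads.foldl pvBGroup PySem.Dict.empty
  groups.values.map (fun grp => (pvReduce grp).items)

-- ===== PRECONDITION & SPEC =====
def Spec_merge_leads (leads : List (List (String × Option String))) (out : List (List (String × Option String))) : Prop := out = merge_leads_alt leads
instance (leads : List (List (String × Option String))) (out : List (List (String × Option String))) : Decidable (Spec_merge_leads leads out) := by unfold Spec_merge_leads; infer_instance

-- ===== CLAIM (what is proved, stated in full; the proofs are below) =====
def Claim_equal_merge_leads : Prop := ∀ (leads : List (List (String × Option String))), Dom_merge_leads leads → Spec_merge_leads leads (merge_leads leads)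

-- ===== LEMMAS AND PROOFS =====

-- the invariant relating A's accumulator to B's
def pvInv (g : PySem.Dict (Option String) (List (PySem.Dict String (Option String))))
    (m : PySem.Dict (Option String) (PySem.Dict String (Option String))) : Prop :=
  m.items = g.items.map (fun p => (p.1, pvReduce p.2)) ∧
  (∀ p ∈ g.items, p.2 ≠ []) ∧
  g.keys.Nodup

theorem pvReduce_append (grp : List (PySem.Dict String (Option String)))
    (h : grp ≠ []) (d : PySem.Dict String (Option String)) :
    pvReduce (grp ++ [d]) = d.items.foldl pvFill (pvReduce grp) := by
  cases grp with
  | nil => exact absurd rfl h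
  | cons a t => simp [pvReduce, List.foldl_append]

theorem pvInv_step (g : PySem.Dict (Option String) (List (PySem.Dict String (Option String))))
    (m : PySem.Dict (Option String) (PySem.Dict String (Option String)))
    (item : List (String × Option String)) (h : pvInv g m) :
    pvInv (pvBGroup g item) (pvAStep m item) := by
  obtain ⟨hitems, hne, hnd⟩ := h
  have hkeys : m.keys = g.keys := by
    simp only [PySem.Dict.keys, hitems, List.map_map]; rfl
  set d := PySem.Dict.ofList item with hd
  set c := pvCompany d with hc
  have hcon : m.contains c = g.contains c := by
    rw [PySem.Dict.contains_eq_decide_mem_keys, PySem.Dict.contains_eq_decide_mem_keys, hkeys]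
  by_cases hg : g.contains c = true
  · -- company already seen: A merges the fields in, B appends to the group
    have hcm : m.contains c = true := by rw [hcon]; exact hg
    obtain ⟨grp, hmem⟩ : ∃ grp, (c, grp) ∈ g.items := by
      have := (PySem.Dict.contains_iff_mem_keys g c).mp hg
      simp only [PySem.Dict.keys, List.mem_map] at this
      obtain ⟨p, hp, hp1⟩ := this
      exact ⟨p.2, by rwa [← hp1, Prod.mk.eta]⟩
    have hgrp_ne : grp ≠ [] := hne _ hmem
    have hgetg : g.getD c [] = grp := PySem.Dict.getD_of_mem_items g hmem hnd []
    have hmemm : (c, pvReduce grp) ∈ m.items := by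
      rw [hitems]; exact List.mem_map.mpr ⟨(c, grp), hmem, rfl⟩
    have hgetm : m.getD c PySem.Dict.empty = pvReduce grp :=
      PySem.Dict.getD_of_mem_items m hmemm (hkeys ▸ hnd) _
    unfold pvBGroup pvAStep
    simp only [← hd, ← hc, hcm, Bool.true_eq_false, ite_false, hgetg, hgetm]
    refine ⟨?_, ?_, ?_⟩
    · rw [PySem.Dict.items_insert_of_contains g _ hg,
          PySem.Dict.items_insert_of_contains m _ hcm, hitems, List.map_map, List.map_map]
      refine List.map_congr_left (fun p hp => ?_)
      by_cases hpc : p.1 = c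
      · simp only [Function.comp_apply, hpc, BEq.rfl, if_pos]
        rw [pvReduce_append grp hgrp_ne d]
      · have : (p.1 == c) = false := by simp [hpc]
        simp only [Function.comp_apply, this, Bool.false_eq_true, ite_false]
    · intro p hp
      rw [PySem.Dict.items_insert_of_contains g _ hg] at hp
      obtain ⟨q, hq, hqe⟩ := List.mem_map.mp hp
      by_cases hqc : (q.1 == c) = true
      · rw [if_pos hqc] at hqe; rw [← hqe]; simp
      · rw [if_neg hqc] at hqe; exact hqe ▸ hne q hq
    · rw [PySem.Dict.keys_insert_of_contains g _ hg]; exact hnd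
  · -- new company: both sides append a fresh entry
    have hgf : g.contains c = false := by simpa using hg
    have hcm : m.contains c = false := by rw [hcon]; exact hgf
    unfold pvBGroup pvAStep
    simp only [← hd, ← hc, hcm, ite_true, PySem.Dict.getD_of_not_contains g [] hgf,
      List.nil_append]
    refine ⟨?_, ?_, ?_⟩
    · rw [PySem.Dict.items_insert_of_not_contains g _ hgf,
          PySem.Dict.items_insert_of_not_contains m _ hcm, hitems, List.map_append]
      rfl
    · intro p hp
      rw [PySem.Dict.items_insert_of_not_contains g _ hgf] at hp
      rcases List.mem_append.mp hp with h1 | h1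
      · exact hne p h1
      · simp only [List.mem_singleton] at h1; rw [h1]; simp
    · exact PySem.Dict.nodup_keys_insert g c [d] hnd

theorem pvInv_fold (leads : List (List (String × Option String)))
    (g : PySem.Dict (Option String) (List (PySem.Dict String (Option String))))
    (m : PySem.Dict (Option String) (PySem.Dict String (Option String))) (h : pvInv g m) :
    pvInv (leads.foldl pvBGroup g) (leads.foldl pvAStep m) := by
  induction leads generalizing g m with
  | nil => exact h
  | cons x xs ih => exact ih _ _ (pvInv_step g m x h)

-- ===== VERDICT (by name: the statement is the Claim_ definition above) =====
theorem merge_leads_spec : Claim_equal_merge_leads := by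
  intro leads _
  unfold Spec_merge_leads merge_leads merge_leads_alt
  have h := pvInv_fold leads PySem.Dict.empty PySem.Dict.empty (by exact ⟨rfl, by intro p hp; simp [PySem.Dict.empty] at hp, by simp [PySem.Dict.empty, PySem.Dict.keys]⟩)
  simp only [PySem.Dict.values, h.1, List.map_map]
  rfl
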